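-- pv_equiv track=rewrite | github.com/ShafinMufdi/avoid-obstacle-game | avoid obstacle .py | converttozero
-- ===== SOURCE A (Python) =====
-- def converttozero(zeroth,a): # a = zone/octant
--     zeroth = [point[:] for point in zeroth]
--     if a==0:
--         zeroth[0][0],zeroth[0][1]=zeroth[0][0],zeroth[0][1]
--         zeroth[1][0],zeroth[1][1]=zeroth[1][0],zeroth[1][1]
--         return zeroth
--
--     elif a==1:
--         zeroth[0][0],zeroth[0][1]=zeroth[0][1],zeroth[0][0]
--         zeroth[1][0],zeroth[1][1]=zeroth[1][1],zeroth[1][0]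
--         return zeroth
--
--     elif a==2:
--         zeroth[0][0],zeroth[0][1]=zeroth[0][1],zeroth[0][0]*-1
--         zeroth[1][0],zeroth[1][1]=zeroth[1][1],-1*zeroth[1][0]
--         return zeroth
--
--     elif a==3:
--         zeroth[0][0],zeroth[0][1]=-1*zeroth[0][0],zeroth[0][1]
--         zeroth[1][0],zeroth[1][1]=-1*zeroth[1][0],zeroth[1][1]
--         return zeroth
--
--     elif a==4:
--         zeroth[0][0],zeroth[0][1]=-1*zeroth[0][0],-1*zeroth[0][1]
--         zeroth[1][0],zeroth[1][1]=-1*zeroth[1][0],-1*zeroth[1][1]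
--         return zeroth
--
--     elif a==5:
--         zeroth[0][0],zeroth[0][1]=-1*zeroth[0][1],-1*zeroth[0][0]
--         zeroth[1][0],zeroth[1][1]=-1*zeroth[1][1],-1*zeroth[1][0]
--         return zeroth
--
--     elif a==6:
--         zeroth[0][0],zeroth[0][1]=-1*zeroth[0][1],zeroth[0][0]
--         zeroth[1][0],zeroth[1][1]=-1*zeroth[1][1],zeroth[1][0]
--         return zeroth
--
--     elif a==7:
--         zeroth[0][0],zeroth[0][1]=zeroth[0][0],-1*zeroth[0][1]
--         zeroth[1][0],zeroth[1][1]=zeroth[1][0],-1*zeroth[1][1]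
--         return zeroth
-- ===== SOURCE B (Python) =====
-- def converttozero(zeroth, a):
--     # dihedral decomposition: each octant transform is rot90 applied a//2 times,
--     # followed by a coordinate swap when a is odd
--     zeroth = [point[:] for point in zeroth]
--     if not (0 <= a < 8):
--         return None
--     k, odd = divmod(a, 2)
--     for p in zeroth[:2]:
--         x, y = p[0], p[1]
--         for _ in range(k):
--             x, y = y, -x
--         if odd:
--             x, y = y, x
--         p[0], p[1] = x, y
--     return zeroth
-- ===== Notes on version B (the rewrite author's own statement) =====
-- stated objective: simpler
-- what changed: Replaces the eight-branch if-elif chain of hand-written sign/swap assignments by a dihedral-group decomposition: rotate (x,y)->(y,-x) a//2 times in a loop, then swap the coordinates if a is odd, applied to the first two points.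
-- outside the precondition, e.g. on converttozero([[1, 2], [3, 4]], 8): A returns None, B returns None
import Mathlib
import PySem

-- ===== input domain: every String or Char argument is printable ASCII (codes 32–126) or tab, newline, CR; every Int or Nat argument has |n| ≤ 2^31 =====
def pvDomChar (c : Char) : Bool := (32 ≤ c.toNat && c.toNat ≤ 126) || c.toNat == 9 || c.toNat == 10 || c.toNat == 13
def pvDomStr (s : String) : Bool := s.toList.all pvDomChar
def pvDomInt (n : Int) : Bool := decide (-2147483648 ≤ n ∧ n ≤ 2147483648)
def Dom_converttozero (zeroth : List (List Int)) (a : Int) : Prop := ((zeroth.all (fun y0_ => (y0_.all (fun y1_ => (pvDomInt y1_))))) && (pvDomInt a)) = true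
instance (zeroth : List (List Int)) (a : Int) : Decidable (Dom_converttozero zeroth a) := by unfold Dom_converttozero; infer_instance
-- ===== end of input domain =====

-- B replaces A's eight-branch if-elif chain by a dihedral-group decomposition: every octant
-- transform is the 90° rotation (x,y)↦(y,-x) applied a//2 times, followed by a swap when a is
-- odd (objective: simpler). Equivalence is about the return value only (both copy their input).

-- ===== PORT A =====
-- literal transliteration: copy, then the eight-branch chain, each branch updating points 0 and 1
def converttozero (zeroth : List (List Int)) (a : Int) : List (List Int) :=
  let z := zeroth.map (fun point => point)   -- zeroth = [point[:] for point in zeroth]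
  let p0 := z.getD 0 []
  let p1 := z.getD 1 []
  if a = 0 then
    (z.set 0 ((p0.set 0 (p0.getD 0 0)).set 1 (p0.getD 1 0))).set 1
      ((p1.set 0 (p1.getD 0 0)).set 1 (p1.getD 1 0))
  else if a = 1 then
    (z.set 0 ((p0.set 0 (p0.getD 1 0)).set 1 (p0.getD 0 0))).set 1
      ((p1.set 0 (p1.getD 1 0)).set 1 (p1.getD 0 0))
  else if a = 2 then
    (z.set 0 ((p0.set 0 (p0.getD 1 0)).set 1 (p0.getD 0 0 * -1))).set 1
      ((p1.set 0 (p1.getD 1 0)).set 1 (-1 * p1.getD 0 0))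
  else if a = 3 then
    (z.set 0 ((p0.set 0 (-1 * p0.getD 0 0)).set 1 (p0.getD 1 0))).set 1
      ((p1.set 0 (-1 * p1.getD 0 0)).set 1 (p1.getD 1 0))
  else if a = 4 then
    (z.set 0 ((p0.set 0 (-1 * p0.getD 0 0)).set 1 (-1 * p0.getD 1 0))).set 1
      ((p1.set 0 (-1 * p1.getD 0 0)).set 1 (-1 * p1.getD 1 0))
  else if a = 5 then
    (z.set 0 ((p0.set 0 (-1 * p0.getD 1 0)).set 1 (-1 * p0.getD 0 0))).set 1
      ((p1.set 0 (-1 * p1.getD 1 0)).set 1 (-1 * p1.getD 0 0))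
  else if a = 6 then
    (z.set 0 ((p0.set 0 (-1 * p0.getD 1 0)).set 1 (p0.getD 0 0))).set 1
      ((p1.set 0 (-1 * p1.getD 1 0)).set 1 (p1.getD 0 0))
  else if a = 7 then
    (z.set 0 ((p0.set 0 (p0.getD 0 0)).set 1 (-1 * p0.getD 1 0))).set 1
      ((p1.set 0 (p1.getD 0 0)).set 1 (-1 * p1.getD 1 0))
  else z   -- Python returns None here; excluded by Pre_converttozero

-- ===== PORT B =====
def converttozero_alt (zeroth : List (List Int)) (a : Int) : List (List Int) :=
  let z := zeroth.map (fun point => point)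
  if ¬ (0 ≤ a ∧ a < 8) then []   -- Python B returns None here; excluded by Pre_converttozero
  else
    let k := (PySem.Int.floordiv a 2).toNat   -- k, odd = divmod(a, 2)
    let odd := PySem.Int.mod a 2
    let step := fun (p : List Int) =>         -- body of 'for p in zeroth[:2]'
      let x := p.getD 0 0                     -- p[0], p[1] (in range under Pre_)
      let y := p.getD 1 0
      let xy := (List.range k).foldl (fun xy _ => (xy.2, -xy.1)) (x, y)
      let xy := if odd ≠ 0 then (xy.2, xy.1) else xy
      (p.set 0 xy.1).set 1 xy.2
    (z.take 2).map step ++ z.drop 2           -- mutating the points of the slice zeroth[:2]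

-- ===== PRECONDITION & SPEC =====
-- Pre_ excludes: a outside 0..7, where A returns None (no value of the declared list type),
-- and inputs with fewer than two points or a first/second point shorter than 2, where A raises IndexError.
def Pre_converttozero (zeroth : List (List Int)) (a : Int) : Prop :=
  0 ≤ a ∧ a < 8 ∧ 2 ≤ zeroth.length ∧
  2 ≤ (zeroth.getD 0 []).length ∧ 2 ≤ (zeroth.getD 1 []).length
instance (zeroth : List (List Int)) (a : Int) : Decidable (Pre_converttozero zeroth a) := by
  unfold Pre_converttozero; infer_instance

def pvWitness_converttozero : List (List Int) × Int := ([[1, 2], [3, -4], [5]], 2)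

def Spec_converttozero (zeroth : List (List Int)) (a : Int) (out : List (List Int)) : Prop := out = converttozero_alt zeroth a
instance (zeroth : List (List Int)) (a : Int) (out : List (List Int)) : Decidable (Spec_converttozero zeroth a out) := by unfold Spec_converttozero; infer_instance

-- ===== CLAIM (what is proved, stated in full; the proofs are below) =====
def Claim_equal_converttozero : Prop := ∀ (zeroth : List (List Int)) (a : Int), Dom_converttozero zeroth a → Pre_converttozero zeroth a → Spec_converttozero zeroth a (converttozero zeroth a)

-- ===== LEMMAS AND PROOFS =====

theorem converttozero_eq_alt (zeroth : List (List Int)) (a : Int)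
    (h : Pre_converttozero zeroth a) : converttozero zeroth a = converttozero_alt zeroth a := by
  obtain ⟨ha0, ha8, hlen, h0, h1⟩ := h
  match zeroth, hlen, h0, h1 with
  | (x0 :: y0 :: t0) :: (x1 :: y1 :: t1) :: rest, _, _, _ =>
    interval_cases a <;>
      simp [converttozero, converttozero_alt, PySem.Int.floordiv, PySem.Int.mod,
            List.range, List.range.loop, List.foldl, neg_mul, mul_neg, mul_one, one_mul]

-- ===== VERDICT (by name: the statement is the Claim_ definition above) =====
theorem converttozero_spec : Claim_equal_converttozero := by
  intro zeroth a _ hpre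
  exact converttozero_eq_alt zeroth a hpre
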